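-- pv_equiv track=rewrite | github.com/lappazos/Intro_Ex_5_Crossword | crossword.py | se_nw_diagonal
-- ===== SOURCE A (Python) =====
-- import math
--
-- def se_nw_diagonal(mat_new):
--     """create a new mat from the original - turns every
--     south-east/north-west diagonal into a list by order"""
--     length = len(mat_new)
--     length_row = len(mat_new[0])
--     se_nw_mat = []
--     counter = 0
--     # now we count from the last index to the first one
--     for i in range(length + length_row - 1, 0, -1):
--         temp = []
--         # we want i to count all of the items up to the first row, but we
--         # need to adjust it so we wont get out of range. in addition,
--         # once row_i reach 0 we would like to set it as 0 until the end of
--         # loop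
--         row_i = i - length_row
--         # if i < length - length_row - 1:
--         if i < length_row:
--             row_i = 0
--             counter += 1
--         for j in range(
--                 min(int(math.fabs(i - (length_row + length))), length_row)):
--             # here we used absolute value because i started from it largest
--             # val to his smallest, and we will get a negative factor - we
--             # need to make it positive.
--             # eventually, we want j to run 0-4
--             c = j + counter
--             # if c > length_row - 1:
--             if c > (
--                     min(int(math.fabs(i - (length_row + length))),
--                         length_row)) - 1:
--                 break
--             temp.append(mat_new[row_i + j][c])
--         se_nw_mat.append(temp)
--     return se_nw_mat
-- ===== SOURCE B (Python) =====
-- def se_nw_diagonal(mat_new):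
--     """create a new mat from the original - turns every
--     south-east/north-west diagonal into a list by order"""
--     n = len(mat_new)
--     m = len(mat_new[0])
--     diags = {}
--     for i, row in enumerate(mat_new):
--         for j in range(m):
--             diags.setdefault(i - j, []).append(row[j])
--     return [diags.get(d, []) for d in range(n - 1, -m, -1)]
-- ===== Notes on version B (the rewrite author's own statement) =====
-- stated objective: simpler
-- what changed: Replaces A's per-diagonal reversed index loop with its counter/fabs/break arithmetic by a single flat group-by pass that appends each cell mat[i][j] to a dict bucket keyed by i-j, then reads the buckets out in key order n-1 down to -(m-1).
import Mathlib
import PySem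

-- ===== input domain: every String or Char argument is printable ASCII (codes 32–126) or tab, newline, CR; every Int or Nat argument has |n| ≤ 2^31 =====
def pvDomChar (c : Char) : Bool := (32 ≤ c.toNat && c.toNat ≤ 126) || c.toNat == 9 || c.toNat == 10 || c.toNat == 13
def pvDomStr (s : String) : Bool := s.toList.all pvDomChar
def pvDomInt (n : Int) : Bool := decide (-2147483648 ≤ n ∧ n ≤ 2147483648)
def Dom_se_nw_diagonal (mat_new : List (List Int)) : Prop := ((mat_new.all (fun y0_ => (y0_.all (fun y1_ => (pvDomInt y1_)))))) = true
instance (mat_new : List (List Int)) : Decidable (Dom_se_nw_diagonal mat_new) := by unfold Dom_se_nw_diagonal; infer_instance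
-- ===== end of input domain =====

-- B replaces A's per-diagonal index/counter/break arithmetic by one flat group-by pass
-- collecting each cell into a dict keyed by i - j (objective: simpler).

-- ===== PORT A =====
-- the inner 'for j in range(...): ... break ... temp.append(...)' loop of A, with the break
-- modelled by a stop flag; 'bound' is the (repeated) expression min(int(math.fabs(i-(length_row+length))), length_row)
-- (int(math.fabs(·)) of an int difference is exactly |·| at these magnitudes).
def pvAInner (mat_new : List (List Int)) (bound row_i counter : Int) : List Int :=
  ((PySem.List.pyRange 0 bound 1).foldl
    (fun (ts : List Int × Bool) j =>
      if ts.2 = true then ts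
      else if j + counter > bound - 1 then (ts.1, true)
      else (ts.1 ++ [PySem.List.pyGetD (PySem.List.pyGetD mat_new (row_i + j) []) (j + counter) 0], false))
    ([], false)).1

def se_nw_diagonal (mat_new : List (List Int)) : List (List Int) :=
  let length : Int := mat_new.length
  let length_row : Int := (PySem.List.pyGetD mat_new 0 []).length
  ((PySem.List.pyRange (length + length_row - 1) 0 (-1)).foldl
    (fun (st : List (List Int) × Int) i =>
      -- row_i = i - length_row, reset to 0 (and counter += 1) when i < length_row
      let rc : Int × Int := if i < length_row then (0, st.2 + 1) else (i - length_row, st.2)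
      let bound : Int := min |i - (length_row + length)| length_row
      (st.1 ++ [pvAInner mat_new bound rc.1 rc.2], rc.2))
    ([], 0)).1

-- ===== PORT B =====
def se_nw_diagonal_alt (mat_new : List (List Int)) : List (List Int) :=
  let n : Int := mat_new.length
  let m : Int := (PySem.List.pyGetD mat_new 0 []).length
  let diags : PySem.Dict Int (List Int) :=
    (PySem.List.enumerate mat_new 0).foldl
      (fun d p =>
        (PySem.List.pyRange 0 m 1).foldl
          (fun d j => d.insert (p.1 - j) (d.getD (p.1 - j) [] ++ [PySem.List.pyGetD p.2 j 0]))
          d)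
      PySem.Dict.empty
  (PySem.List.pyRange (n - 1) (-m) (-1)).map (fun dd => diags.getD dd [])

-- ===== PRECONDITION & SPEC =====
-- Pre_ excludes exactly the inputs where Python A raises an IndexError: the empty matrix
-- (mat_new[0]) and matrices with a row shorter than the first row (mat_new[...][c]).
def Pre_se_nw_diagonal (mat_new : List (List Int)) : Prop :=
  mat_new ≠ [] ∧ ∀ row ∈ mat_new, (PySem.List.pyGetD mat_new 0 []).length ≤ row.length
instance (mat_new : List (List Int)) : Decidable (Pre_se_nw_diagonal mat_new) := by
  unfold Pre_se_nw_diagonal; infer_instance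

def pvWitness_se_nw_diagonal : List (List Int) := [[1, 2, 3], [4, 5, 6]]

def Spec_se_nw_diagonal (mat_new : List (List Int)) (out : List (List Int)) : Prop := out = se_nw_diagonal_alt mat_new
instance (mat_new : List (List Int)) (out : List (List Int)) : Decidable (Spec_se_nw_diagonal mat_new out) := by unfold Spec_se_nw_diagonal; infer_instance

-- ===== CLAIM (what is proved, stated in full; the proofs are below) =====
def Claim_equal_se_nw_diagonal : Prop := ∀ (mat_new : List (List Int)), Dom_se_nw_diagonal mat_new → Pre_se_nw_diagonal mat_new → Spec_se_nw_diagonal mat_new (se_nw_diagonal mat_new)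

-- ===== LEMMAS AND PROOFS =====

-- the cell read mat[r][c] (both ports read cells through the same defaults)
def pvCell (mat : List (List Int)) (r c : Int) : Int :=
  PySem.List.pyGetD (PySem.List.pyGetD mat r []) c 0

-- the SE/NW diagonal of key dd = i - j, top to bottom: common normal form of both ports
def pvDiag (mat : List (List Int)) (m dd : Int) : List Int :=
  (PySem.List.pyRange (max 0 dd) (min (mat.length : Int) (dd + m)) 1).map
    (fun r => pvCell mat r (r - dd))

-- ---------- A-side ----------

theorem pvAInner_flag_true (mat : List (List Int)) (bound row_i counter : Int)
    (l : List Int) (acc : List Int) :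
    (l.foldl
      (fun (ts : List Int × Bool) j =>
        if ts.2 = true then ts
        else if j + counter > bound - 1 then (ts.1, true)
        else (ts.1 ++ [PySem.List.pyGetD (PySem.List.pyGetD mat (row_i + j) []) (j + counter) 0], false))
      (acc, true)) = (acc, true) := by
  induction l with
  | nil => rfl
  | cons x t ih => simpa using ih

theorem pvAInner_go (mat : List (List Int)) (bound row_i counter : Int)
    (hc : 0 ≤ counter) :
    ∀ (k : Nat) (a : Int), (bound - a).toNat = k → ∀ (acc : List Int),
    ((PySem.List.pyRange a bound 1).foldl
      (fun (ts : List Int × Bool) j =>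
        if ts.2 = true then ts
        else if j + counter > bound - 1 then (ts.1, true)
        else (ts.1 ++ [PySem.List.pyGetD (PySem.List.pyGetD mat (row_i + j) []) (j + counter) 0], false))
      (acc, false)).1
    = acc ++ (PySem.List.pyRange a (bound - counter) 1).map
        (fun j => pvCell mat (row_i + j) (j + counter)) := by
  intro k
  induction k with
  | zero =>
    intro a ha acc
    have hba : bound ≤ a := by omega
    rw [PySem.List.pyRange_one_eq_nil hba, PySem.List.pyRange_one_eq_nil (by omega)]
    simp
  | succ k ih =>
    intro a ha acc
    have hab : a < bound := by omega
    rw [PySem.List.pyRange_one_cons hab]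
    simp only [List.foldl_cons]
    by_cases hbr : a + counter > bound - 1
    · simp only [Bool.false_eq_true, if_false, if_pos hbr]
      rw [pvAInner_flag_true, PySem.List.pyRange_one_eq_nil (by omega)]
      simp
    · simp only [Bool.false_eq_true, if_false, if_neg hbr]
      rw [ih (a + 1) (by omega),
        show PySem.List.pyRange a (bound - counter) 1
            = a :: PySem.List.pyRange (a + 1) (bound - counter) 1
          from PySem.List.pyRange_one_cons (by omega)]
      simp [pvCell]

theorem pvAInner_eq (mat : List (List Int)) (bound row_i counter : Int) (hc : 0 ≤ counter) :
    pvAInner mat bound row_i counter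
    = (PySem.List.pyRange 0 (bound - counter) 1).map
        (fun j => pvCell mat (row_i + j) (j + counter)) := by
  unfold pvAInner
  simpa using pvAInner_go mat bound row_i counter hc (bound - 0).toNat 0 rfl []

-- A's per-iteration diagonal, as a function of the outer index i alone
def pvADiag (mat : List (List Int)) (n m : Int) (i : Int) : List Int :=
  pvAInner mat (min |i - (m + n)| m) (if i < m then 0 else i - m) (max (m - i) 0)

theorem pvA_outer_go (mat : List (List Int)) (n m : Int) :
    ∀ (k : Nat) (i : Int), i ≤ n + m - 1 → i.toNat = k → ∀ (acc : List (List Int)),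
    ((PySem.List.pyRange i 0 (-1)).foldl
      (fun (st : List (List Int) × Int) i' =>
        let rc : Int × Int := if i' < m then (0, st.2 + 1) else (i' - m, st.2)
        let bound : Int := min |i' - (m + n)| m
        (st.1 ++ [pvAInner mat bound rc.1 rc.2], rc.2))
      (acc, max (m - 1 - i) 0)).1
    = acc ++ (PySem.List.pyRange i 0 (-1)).map (pvADiag mat n m) := by
  intro k
  induction k with
  | zero =>
    intro i hi hk acc
    rw [PySem.List.pyRange_neg_one_eq_nil (by omega)]
    simp
  | succ k ih =>
    intro i hi hk acc
    have h0i : 0 < i := by omega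
    rw [PySem.List.pyRange_neg_one_cons h0i]
    simp only [List.foldl_cons, List.map_cons]
    have hstep : ((acc ++ [pvAInner mat (min |i - (m + n)| m)
          (if i < m then ((0 : Int), max (m - 1 - i) 0 + 1) else (i - m, max (m - 1 - i) 0)).1
          (if i < m then ((0 : Int), max (m - 1 - i) 0 + 1) else (i - m, max (m - 1 - i) 0)).2],
        (if i < m then ((0 : Int), max (m - 1 - i) 0 + 1) else (i - m, max (m - 1 - i) 0)).2)
        : List (List Int) × Int)
        = (acc ++ [pvADiag mat n m i], max (m - 1 - (i - 1)) 0) := by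
      by_cases him : i < m
      · rw [if_pos him]
        simp only [pvADiag, if_pos him]
        rw [show max (m - 1 - i) 0 + 1 = max (m - i) 0 by omega,
            show max (m - 1 - (i - 1)) 0 = max (m - i) 0 by omega]
      · rw [if_neg him]
        simp only [pvADiag, if_neg him]
        rw [show max (m - 1 - i) 0 = max (m - i) 0 by omega,
            show max (m - 1 - (i - 1)) 0 = max (m - i) 0 by omega]
    rw [hstep, ih (i - 1) (by omega) (by omega)]
    simp

theorem pvA_eq_map (mat : List (List Int)) :
    se_nw_diagonal mat
    = (PySem.List.pyRange ((mat.length : Int) + ((PySem.List.pyGetD mat 0 []).length : Int) - 1) 0 (-1)).map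
        (pvADiag mat (mat.length : Int) ((PySem.List.pyGetD mat 0 []).length : Int)) := by
  unfold se_nw_diagonal
  have hn : (0 : Int) ≤ (mat.length : Int) := by positivity
  have hm : (0 : Int) ≤ ((PySem.List.pyGetD mat 0 []).length : Int) := by positivity
  have := pvA_outer_go mat (mat.length : Int) ((PySem.List.pyGetD mat 0 []).length : Int)
    ((mat.length : Int) + ((PySem.List.pyGetD mat 0 []).length : Int) - 1).toNat
    ((mat.length : Int) + ((PySem.List.pyGetD mat 0 []).length : Int) - 1) (by omega) rfl []
  rw [show max (((PySem.List.pyGetD mat 0 []).length : Int) - 1 - ((mat.length : Int) + ((PySem.List.pyGetD mat 0 []).length : Int) - 1)) 0 = 0 by omega] at this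
  simpa using this

-- the pointwise identification of A's diagonal with pvDiag
theorem pvADiag_eq_pvDiag (mat : List (List Int)) (m i : Int)
    (hm : 0 ≤ m) (h1 : 1 ≤ i) (h2 : i ≤ (mat.length : Int) + m - 1) :
    pvADiag mat (mat.length : Int) m i = pvDiag mat m (i - m) := by
  have hn0 : (0 : Int) ≤ (mat.length : Int) := by positivity
  have habs : |i - (m + (mat.length : Int))| = m + (mat.length : Int) - i := by
    rw [abs_of_nonpos (by omega)]; ring
  unfold pvADiag pvDiag
  rw [habs, pvAInner_eq mat _ _ _ (by omega)]
  rw [PySem.List.pyRange_one, PySem.List.pyRange_one]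
  rw [show (min (m + (mat.length : Int) - i) m - max (m - i) 0 - 0).toNat
      = (min ((mat.length : Int)) (i - m + m) - max 0 (i - m)).toNat by omega]
  rw [List.map_map, List.map_map]
  apply List.map_congr_left
  intro k _
  simp only [Function.comp]
  by_cases him : i < m
  · rw [if_pos him]
    rw [show (0:Int) + (k:Int) + max (m - i) 0 = max 0 (i - m) + (k:Int) - (i - m) by omega]
    rw [show (0:Int) + ((0:Int) + (k:Int)) = max 0 (i - m) + (k:Int) by omega]
  · rw [if_neg him]
    rw [show (0:Int) + (k:Int) + max (m - i) 0 = max 0 (i - m) + (k:Int) - (i - m) by omega]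
    rw [show i - m + ((0:Int) + (k:Int)) = max 0 (i - m) + (k:Int) by omega]

-- ---------- B-side ----------

theorem pvB_row (mN : Nat) (i : Int) (row : List Int)
    (d : PySem.Dict Int (List Int)) (dd : Int) :
    ((PySem.List.pyRange 0 (mN : Int) 1).foldl
      (fun d j => d.insert (i - j) (d.getD (i - j) [] ++ [PySem.List.pyGetD row j 0]))
      d).getD dd []
    = d.getD dd [] ++
        (if 0 ≤ i - dd ∧ i - dd < (mN : Int) then [PySem.List.pyGetD row (i - dd) 0] else []) := by
  induction mN with
  | zero =>
    rw [PySem.List.pyRange_one_eq_nil (by omega)]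
    simp only [List.foldl_nil]
    rw [if_neg (by omega)]
    simp
  | succ t ih =>
    have : ((t + 1 : Nat) : Int) = (t : Int) + 1 := by push_cast; ring
    rw [this, PySem.List.pyRange_one_succ_right (by positivity), List.foldl_append]
    simp only [List.foldl_cons, List.foldl_nil]
    by_cases hdd : dd = i - (t : Int)
    · subst hdd
      rw [PySem.Dict.getD_insert_self, ih]
      rw [if_neg (by omega), if_pos (by omega)]
      simp [show i - (i - (t : Int)) = (t : Int) by ring]
    · rw [PySem.Dict.getD_insert_of_ne _ _ _ (by omega), ih]
      by_cases hin : 0 ≤ i - dd ∧ i - dd < (t : Int)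
      · rw [if_pos hin, if_pos (by omega)]
      · rw [if_neg hin, if_neg (by omega)]

theorem pvB_rows (mN : Nat) (dd : Int) :
    ∀ (ps : List (Int × List Int)) (d : PySem.Dict Int (List Int)),
    ((ps.foldl
      (fun d p =>
        (PySem.List.pyRange 0 (mN : Int) 1).foldl
          (fun d j => d.insert (p.1 - j) (d.getD (p.1 - j) [] ++ [PySem.List.pyGetD p.2 j 0]))
          d)
      d).getD dd [])
    = d.getD dd [] ++
        ps.filterMap (fun p =>
          if 0 ≤ p.1 - dd ∧ p.1 - dd < (mN : Int) then some (PySem.List.pyGetD p.2 (p.1 - dd) 0) else none) := by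
  intro ps
  induction ps with
  | nil => simp
  | cons p t ih =>
    intro d
    simp only [List.foldl_cons, List.filterMap_cons]
    rw [ih, pvB_row mN p.1 p.2 d dd]
    by_cases hin : 0 ≤ p.1 - dd ∧ p.1 - dd < (mN : Int)
    · rw [if_pos hin, if_pos hin]; simp
    · rw [if_neg hin, if_neg hin]; simp

-- a filterMap over a range with an interval guard is a map over the clamped range
theorem pvWindow (g : Int → Int) (lo hi : Int) :
    ∀ (k : Nat) (a b : Int), (b - a).toNat = k →
    (PySem.List.pyRange a b 1).filterMap
      (fun r => if lo ≤ r ∧ r < hi then some (g r) else none)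
    = (PySem.List.pyRange (max a lo) (min b hi) 1).map g := by
  intro k
  induction k with
  | zero =>
    intro a b hk
    rw [PySem.List.pyRange_one_eq_nil (by omega), PySem.List.pyRange_one_eq_nil (by omega)]
    simp
  | succ k ih =>
    intro a b hk
    have hab : a < b := by omega
    rw [PySem.List.pyRange_one_cons hab]
    simp only [List.filterMap_cons]
    by_cases hin : lo ≤ a ∧ a < hi
    · rw [if_pos hin, ih (a + 1) b (by omega)]
      rw [show max a lo = a by omega, show max (a + 1) lo = a + 1 by omega]
      rw [show PySem.List.pyRange a (min b hi) 1
            = a :: PySem.List.pyRange (a + 1) (min b hi) 1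
          from PySem.List.pyRange_one_cons (by omega)]
      simp
    · rw [if_neg hin, ih (a + 1) b (by omega)]
      by_cases hlo : a < lo
      · rw [show max a lo = lo by omega, show max (a + 1) lo = lo by omega]
      · have hhi : hi ≤ a := by omega
        rw [PySem.List.pyRange_one_eq_nil (by omega), PySem.List.pyRange_one_eq_nil (by omega)]

theorem pvB_eq_map (mat : List (List Int)) :
    se_nw_diagonal_alt mat
    = (PySem.List.pyRange ((mat.length : Int) - 1) (-((PySem.List.pyGetD mat 0 []).length : Int)) (-1)).map
        (pvDiag mat ((PySem.List.pyGetD mat 0 []).length : Int)) := by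
  unfold se_nw_diagonal_alt
  apply List.map_congr_left
  intro dd _
  rw [pvB_rows (PySem.List.pyGetD mat 0 []).length dd (PySem.List.enumerate mat 0) PySem.Dict.empty,
      PySem.Dict.getD_empty, List.nil_append]
  rw [PySem.List.enumerate_eq_map_pyRange mat [], List.filterMap_map]
  show List.filterMap
      (fun r => if 0 ≤ r - dd ∧ r - dd < ((PySem.List.pyGetD mat 0 []).length : Int)
        then some (PySem.List.pyGetD (PySem.List.pyGetD mat r []) (r - dd) 0) else none)
      (PySem.List.pyRange 0 (PySem.List.len mat) 1)
    = pvDiag mat ((PySem.List.pyGetD mat 0 []).length : Int) dd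
  have hfun : (fun r => if 0 ≤ r - dd ∧ r - dd < ((PySem.List.pyGetD mat 0 []).length : Int)
        then some (PySem.List.pyGetD (PySem.List.pyGetD mat r []) (r - dd) 0) else none)
      = (fun r => if dd ≤ r ∧ r < dd + ((PySem.List.pyGetD mat 0 []).length : Int)
        then some (pvCell mat r (r - dd)) else none) := by
    funext r
    by_cases h : dd ≤ r ∧ r < dd + ((PySem.List.pyGetD mat 0 []).length : Int)
    · rw [if_pos (by omega), if_pos h]; rfl
    · rw [if_neg (by omega), if_neg h]
  rw [hfun, pvWindow (fun r => pvCell mat r (r - dd)) dd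
      (dd + ((PySem.List.pyGetD mat 0 []).length : Int))
      (PySem.List.len mat - 0).toNat 0 (PySem.List.len mat) rfl]
  rfl

-- ---------- verdict ----------

theorem pv_main (mat : List (List Int)) :
    se_nw_diagonal mat = se_nw_diagonal_alt mat := by
  rw [pvA_eq_map, pvB_eq_map]
  set n : Int := (mat.length : Int) with hn
  set m : Int := ((PySem.List.pyGetD mat 0 []).length : Int) with hm
  have hn0 : 0 ≤ n := by positivity
  have hm0 : 0 ≤ m := by positivity
  rw [PySem.List.pyRange_neg_one, PySem.List.pyRange_neg_one]
  rw [show n + m - 1 - 0 = n - 1 - -m by ring]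
  rw [List.map_map, List.map_map]
  apply List.map_congr_left
  intro k hk
  simp only [Function.comp]
  rw [List.mem_range] at hk
  have hki : (k : Int) < n - 1 - -m := by
    have := hk
    omega
  rw [show n - 1 - (k : Int) = (n + m - 1 - (k : Int)) - m by ring]
  exact pvADiag_eq_pvDiag mat m (n + m - 1 - (k : Int)) hm0 (by omega) (by omega)

-- ===== VERDICT (by name: the statement is the Claim_ definition above) =====
theorem se_nw_diagonal_spec : Claim_equal_se_nw_diagonal := by
  intro mat _ _
  unfold Spec_se_nw_diagonal
  exact pv_main mat
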